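-- pv_equiv track=rewrite | github.com/bhrdj/el_documents | scripts/lib/bullet_detection.py | detect_base_indent
-- ===== SOURCE A (Python) =====
-- from typing import List, Tuple, Optional
-- from math import gcd
-- from functools import reduce
--
-- def is_list_item(line: str) -> bool:
--     """Check if a line is a bullet list item.
--
--     Args:
--         line: Line to check
--
--     Returns:
--         True if line is a bullet list item
--     """
--     stripped = line.lstrip()
--     if not stripped:
--         return False
--
--     # Check for bullet markers: -, *, +
--     return stripped[0] in ['-', '*', '+'] and (len(stripped) == 1 or stripped[1] == ' ')
--
-- def count_leading_spaces(line: str) -> int: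
--     """Count leading spaces in a line.
--
--     Args:
--         line: Line to analyze
--
--     Returns:
--         Number of leading spaces
--     """
--     if not line:
--         return 0
--
--     count = 0
--     for char in line:
--         if char == ' ':
--             count += 1
--         elif char == '\t':
--             # Convert tabs to 4 spaces
--             count += 4
--         else:
--             break
--
--     return count
--
-- def detect_base_indent(list_block: List[str]) -> int:
--     """Detect the base indentation unit from a list block using GCD approach.
--
--     Args:
--         list_block: Lines in the list block
--
--     Returns:
--         Base indentation unit in spaces (defaults to 2 if can't detect)
--     """
--     indents = []
--
--     for line in list_block:
--         if is_list_item(line):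
--             indent = count_leading_spaces(line)
--             indents.append(indent)
--
--     if not indents:
--         return 2  # Default
--
--     # Remove duplicates and sort
--     unique_indents = sorted(set(indents))
--
--     if len(unique_indents) == 1:
--         # All items at same level
--         return 2  # Default spacing
--
--     # Calculate differences between consecutive levels
--     differences = []
--     for i in range(len(unique_indents) - 1):
--         diff = unique_indents[i + 1] - unique_indents[i]
--         if diff > 0:
--             differences.append(diff)
--
--     if not differences:
--         return 2
--
--     # Find GCD of all differences
--     base_unit = reduce(gcd, differences)
--
--     # Sanity check: base unit should be reasonable (1-8 spaces)
--     if base_unit < 1 or base_unit > 8: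
--         return 2
--
--     return base_unit
-- ===== SOURCE B (Python) =====
-- from typing import List
-- from math import gcd
-- from functools import reduce
--
--
-- def is_list_item(line: str) -> bool:
--     stripped = line.lstrip()
--     if not stripped:
--         return False
--     return stripped[0] in ['-', '*', '+'] and (len(stripped) == 1 or stripped[1] == ' ')
--
--
-- def count_leading_spaces(line: str) -> int:
--     if not line:
--         return 0
--     count = 0
--     for char in line:
--         if char == ' ':
--             count += 1
--         elif char == '\t':
--             count += 4
--         else:
--             break
--     return count
--
--
-- def detect_base_indent(list_block: List[str]) -> int:
--     indents = [count_leading_spaces(line) for line in list_block if is_list_item(line)]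
--     if not indents:
--         return 2
--     m = min(indents)
--     g = reduce(gcd, (x - m for x in indents))
--     return 2 if g < 1 or g > 8 else g
-- ===== Notes on version B (the rewrite author's own statement) =====
-- stated objective: simpler
-- what changed: detect_base_indent drops the sorted(set(...)) pass, the len==1 special case and the consecutive-difference loop, and instead reduces gcd over each indent's offset from the minimum indent, with g<1 (all-equal case folds into gcd==0) or g>8 falling back to the default 2.
import Mathlib
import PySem

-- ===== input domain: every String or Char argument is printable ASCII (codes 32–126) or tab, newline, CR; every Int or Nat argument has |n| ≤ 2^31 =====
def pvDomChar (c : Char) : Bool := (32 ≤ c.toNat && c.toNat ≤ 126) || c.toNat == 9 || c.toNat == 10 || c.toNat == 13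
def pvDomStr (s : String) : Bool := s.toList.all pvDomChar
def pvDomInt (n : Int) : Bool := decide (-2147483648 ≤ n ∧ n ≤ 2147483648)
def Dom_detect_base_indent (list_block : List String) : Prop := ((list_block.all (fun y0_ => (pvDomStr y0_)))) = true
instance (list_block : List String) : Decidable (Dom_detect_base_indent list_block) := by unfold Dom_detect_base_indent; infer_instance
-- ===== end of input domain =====

-- B replaces A's sorted(set(...)) + consecutive-difference loop by gcd of each indent's
-- offset from the minimum, computed in one reduce; objective: simpler.

-- ===== PORT A =====
-- helpers shared verbatim by both Python versions

def is_list_item (line : String) : Bool :=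
  match PySem.Chars.lstrip line.toList with
  | [] => false
  | c :: rest =>
    (c == '-' || c == '*' || c == '+') && (rest == [] || rest.head? == some ' ')

def clsLoop : List Char → Int → Int
  | [], count => count
  | c :: rest, count =>
    if c == ' ' then clsLoop rest (count + 1)
    else if c == '\t' then clsLoop rest (count + 4)
    else count

def count_leading_spaces (line : String) : Int :=
  if line.toList == [] then 0 else clsLoop line.toList 0

-- math.gcd on ints: nonnegative gcd of absolute values
def pygcd (a b : Int) : Int := (Int.gcd a b : Int)

def detect_base_indent (list_block : List String) : Int :=
  let indents : List Int := list_block.foldl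
    (fun acc line => if is_list_item line then acc ++ [count_leading_spaces line] else acc) []
  if indents = [] then 2
  else
    let unique_indents := PySem.List.sorted (PySem.Set.ofList indents) (fun x => x) false
    if unique_indents.length = 1 then 2
    else
      -- range(len(u)-1) has a nonnegative bound, ported as List.range; each u[i] index is
      -- provably in range, ported as getD (exact there)
      let differences : List Int := (List.range (unique_indents.length - 1)).foldl
        (fun acc i =>
          let diff := unique_indents.getD (i+1) 0 - unique_indents.getD i 0
          if 0 < diff then acc ++ [diff] else acc) []
      if differences = [] then 2
      else
        let base_unit :=
          match differences with
          | [] => (0 : Int)   -- unreachable (guarded by the branch above)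
          | d :: ds => ds.foldl pygcd d
        if base_unit < 1 ∨ base_unit > 8 then 2 else base_unit

-- ===== PORT B =====
def detect_base_indent_alt (list_block : List String) : Int :=
  match (list_block.filter is_list_item).map count_leading_spaces with
  | [] => 2
  | i :: is =>
    let m := (PySem.List.min? (i :: is) (fun x => x)).getD i   -- min of a nonempty list
    let g := (is.map (fun x => x - m)).foldl pygcd (i - m)     -- reduce(gcd, offsets)
    if g < 1 ∨ g > 8 then 2 else g

-- ===== PRECONDITION & SPEC =====
def Spec_detect_base_indent (list_block : List String) (out : Int) : Prop := out = detect_base_indent_alt list_block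
instance (list_block : List String) (out : Int) : Decidable (Spec_detect_base_indent list_block out) := by unfold Spec_detect_base_indent; infer_instance

-- ===== CLAIM (what is proved, stated in full; the proofs are below) =====
def Claim_equal_detect_base_indent : Prop := ∀ (list_block : List String), Dom_detect_base_indent list_block → Spec_detect_base_indent list_block (detect_base_indent list_block)

-- ===== LEMMAS AND PROOFS =====

-- proof-side names for the two cores (definitionally equal to the ports applied to the indent list)
def uniq (I : List Int) : List Int := PySem.List.sorted (PySem.Set.ofList I) (fun x => x) false

def diffs (u : List Int) : List Int :=
  (List.range (u.length - 1)).foldl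
    (fun acc i =>
      let diff := u.getD (i+1) 0 - u.getD i 0
      if 0 < diff then acc ++ [diff] else acc) []

def redgcd : List Int → Int
  | [] => 0
  | d :: ds => ds.foldl pygcd d

def Acore (I : List Int) : Int :=
  if I = [] then 2
  else if (uniq I).length = 1 then 2
  else if diffs (uniq I) = [] then 2
  else if redgcd (diffs (uniq I)) < 1 ∨ redgcd (diffs (uniq I)) > 8 then 2
  else redgcd (diffs (uniq I))

def bmin (i : Int) (is : List Int) : Int := (PySem.List.min? (i :: is) (fun x => x)).getD i

def redoff (i : Int) (is : List Int) : Int :=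
  (is.map (fun x => x - bmin i is)).foldl pygcd (i - bmin i is)

def Bcore : List Int → Int
  | [] => 2
  | i :: is => if redoff i is < 1 ∨ redoff i is > 8 then 2 else redoff i is

-- folding pygcd from a nonnegative start is the Nat.gcd fold over absolute values
theorem foldl_pygcd_eq (l : List Int) (a : Nat) :
    l.foldl pygcd (a : Int) = ((l.foldl (fun g x => Nat.gcd g x.natAbs) a : Nat) : Int) := by
  induction l generalizing a with
  | nil => rfl
  | cons x t ih =>
      simpa [pygcd, Int.gcd] using ih (a.gcd x.natAbs)

-- divisor characterisation of the Nat.gcd fold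
theorem dvd_foldl_gcd_iff (l : List Int) (a d : Nat) :
    d ∣ l.foldl (fun g x => Nat.gcd g x.natAbs) a ↔ d ∣ a ∧ ∀ x ∈ l, (d : Int) ∣ x := by
  induction l generalizing a with
  | nil => simp
  | cons x t ih =>
      simp only [List.foldl_cons, ih, Nat.dvd_gcd_iff, List.mem_cons]
      constructor
      · rintro ⟨⟨h1, h2⟩, h3⟩
        refine ⟨h1, ?_⟩
        rintro y (rfl | hy)
        · exact Int.dvd_natAbs.mp (Int.natCast_dvd_natCast.mpr h2)
        · exact h3 y hy
      · rintro ⟨h1, h2⟩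
        exact ⟨⟨h1, Int.natCast_dvd_natCast.mp (Int.dvd_natAbs.mpr (h2 x (Or.inl rfl)))⟩,
               fun y hy => h2 y (Or.inr hy)⟩

-- divisor characterisation of reduce(gcd, d :: ds) written as the Nat fold
theorem dvd_red_iff (d : Int) (ds : List Int) (k : Nat) :
    k ∣ ds.foldl (fun g x => Nat.gcd g x.natAbs) d.natAbs ↔ ∀ x ∈ d :: ds, (k : Int) ∣ x := by
  rw [dvd_foldl_gcd_iff]
  constructor
  · rintro ⟨h1, h2⟩ x hx
    rcases List.mem_cons.mp hx with rfl | hx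
    · exact Int.dvd_natAbs.mp (Int.natCast_dvd_natCast.mpr h1)
    · exact h2 x hx
  · intro h
    exact ⟨Int.natCast_dvd_natCast.mp (Int.dvd_natAbs.mpr (h d (List.mem_cons_self ..))),
           fun x hx => h x (List.mem_cons.mpr (Or.inr hx))⟩

-- a divisor of all consecutive differences divides every offset from the first element
theorem telescope (u : List Int) (c : Int)
    (h : ∀ j, j + 1 < u.length → c ∣ u.getD (j+1) 0 - u.getD j 0) :
    ∀ j, j < u.length → c ∣ u.getD j 0 - u.getD 0 0 := by
  intro j
  induction j with
  | zero => intro _; simp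
  | succ k ih =>
      intro hj
      have h1 := h k hj
      have h2 := ih (by omega)
      have h3 := dvd_add h1 h2
      rwa [sub_add_sub_cancel] at h3

-- A's difference loop, evaluated: with all consecutive differences positive it keeps them all
theorem diffs_eq (u : List Int)
    (h : ∀ j, j + 1 < u.length → 0 < u.getD (j+1) 0 - u.getD j 0) :
    diffs u = (List.range (u.length - 1)).map (fun j => u.getD (j+1) 0 - u.getD j 0) := by
  unfold diffs
  suffices H : ∀ k, k ≤ u.length - 1 → ∀ acc : List Int,
      (List.range k).foldl
        (fun acc i =>
          let diff := u.getD (i+1) 0 - u.getD i 0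
          if 0 < diff then acc ++ [diff] else acc) acc
      = acc ++ (List.range k).map (fun j => u.getD (j+1) 0 - u.getD j 0) by
    simpa using H (u.length - 1) le_rfl []
  intro k
  induction k with
  | zero => intro _ acc; simp
  | succ k ih =>
      intro hk acc
      have hk1 : k + 1 < u.length := by omega
      have hpos := h k hk1
      rw [List.range_succ, List.foldl_append, List.map_append, ih (by omega)]
      simp only [List.foldl_cons, List.foldl_nil, List.map_cons, List.map_nil, hpos, if_true,
        List.append_assoc]

theorem core_eq : ∀ I0 : List Int, Acore I0 = Bcore I0
  | [] => rfl
  | i :: is => by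
    have hmin' : PySem.List.min? (i :: is) (fun x => x) = some (bmin i is) := by
      simp [bmin, PySem.List.min?_id_cons]
    have hmmem : bmin i is ∈ i :: is := PySem.List.min?_mem hmin'
    have hmle : ∀ y ∈ i :: is, bmin i is ≤ y := PySem.List.min?_isMin hmin'
    have hperm : (uniq (i :: is)).Perm (PySem.Set.ofList (i :: is)) := by
      unfold uniq; exact PySem.List.sorted_perm _ _ _
    have hmem : ∀ x : Int, x ∈ uniq (i :: is) ↔ x ∈ i :: is := fun x =>
      (hperm.mem_iff).trans (PySem.Set.mem_ofList _ _)
    have hpw : (uniq (i :: is)).Pairwise (· < ·) := by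
      unfold uniq; exact PySem.List.sorted_ofList_pairwise_lt _
    have hB : Bcore (i :: is) = if redoff i is < 1 ∨ redoff i is > 8 then 2 else redoff i is := rfl
    have hioff : (0:Int) ≤ i - bmin i is := sub_nonneg.mpr (hmle i (List.mem_cons_self ..))
    have hred : redoff i is
        = (((is.map (fun x => x - bmin i is)).foldl (fun g x => Nat.gcd g x.natAbs)
            (i - bmin i is).natAbs : Nat) : Int) := by
      have h := foldl_pygcd_eq (is.map (fun x => x - bmin i is)) (i - bmin i is).natAbs
      rw [Int.natAbs_of_nonneg hioff] at h
      exact h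
    have hNB : ∀ k : Nat,
        (k ∣ (is.map (fun x => x - bmin i is)).foldl (fun g x => Nat.gcd g x.natAbs)
          (i - bmin i is).natAbs) ↔ ∀ x ∈ i :: is, (k : Int) ∣ x - bmin i is := by
      intro k
      rw [dvd_red_iff]
      constructor
      · intro h x hx
        rcases List.mem_cons.mp hx with rfl | hx
        · exact h _ (List.mem_cons_self ..)
        · exact h _ (List.mem_cons.mpr (Or.inr (List.mem_map.mpr ⟨x, hx, rfl⟩)))
      · intro h y hy
        rcases List.mem_cons.mp hy with rfl | hy
        · exact h i (List.mem_cons_self ..)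
        · obtain ⟨x, hx, rfl⟩ := List.mem_map.mp hy
          exact h x (List.mem_cons.mpr (Or.inr hx))
    by_cases hlen1 : (uniq (i :: is)).length = 1
    · -- all indents equal: A takes the len==1 default, B's gcd of offsets is 0
      have hA : Acore (i :: is) = 2 := by
        unfold Acore
        rw [if_neg (List.cons_ne_nil i is), if_pos hlen1]
      obtain ⟨a, hua⟩ := List.length_eq_one_iff.mp hlen1
      have hall : ∀ x ∈ i :: is, x = a := by
        intro x hx
        have hxu : x ∈ uniq (i :: is) := (hmem x).mpr hx
        rw [hua] at hxu
        simpa using hxu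
      have hz : ∀ x ∈ i :: is, (0 : Int) ∣ x - bmin i is := by
        intro x hx
        rw [hall x hx, hall _ hmmem, sub_self]
      have h0 : (is.map (fun x => x - bmin i is)).foldl (fun g x => Nat.gcd g x.natAbs)
          (i - bmin i is).natAbs = 0 := zero_dvd_iff.mp ((hNB 0).mpr hz)
      rw [hA, hB, hred, h0]
      norm_num
    · -- at least two distinct indent levels
      have hne : uniq (i :: is) ≠ [] := by
        intro h
        have hi : i ∈ uniq (i :: is) := (hmem i).mpr (List.mem_cons_self ..)
        rw [h] at hi
        simp at hi
      have hn2 : 2 ≤ (uniq (i :: is)).length := by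
        have := List.length_pos_of_ne_nil hne
        omega
      have hdlt : ∀ j, j + 1 < (uniq (i :: is)).length →
          0 < (uniq (i :: is)).getD (j+1) 0 - (uniq (i :: is)).getD j 0 := by
        intro j hj
        have hj0 : j < (uniq (i :: is)).length := by omega
        rw [List.getD_eq_getElem _ _ hj, List.getD_eq_getElem _ _ hj0]
        have := List.pairwise_iff_getElem.mp hpw j (j+1) hj0 hj (Nat.lt_succ_self j)
        omega
      have hdiffs := diffs_eq (uniq (i :: is)) hdlt
      have hDne : diffs (uniq (i :: is)) ≠ [] := by
        rw [hdiffs]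
        simp only [ne_eq, List.map_eq_nil_iff, List.range_eq_nil]
        omega
      have hA : Acore (i :: is)
          = if redgcd (diffs (uniq (i :: is))) < 1 ∨ redgcd (diffs (uniq (i :: is))) > 8 then 2
            else redgcd (diffs (uniq (i :: is))) := by
        unfold Acore
        rw [if_neg (List.cons_ne_nil i is), if_neg hlen1, if_neg hDne]
      obtain ⟨d, ds, hD⟩ := List.exists_cons_of_ne_nil hDne
      have hposall : ∀ x ∈ diffs (uniq (i :: is)), 0 < x := by
        rw [hdiffs]
        intro x hx
        obtain ⟨j, hj, rfl⟩ := List.mem_map.mp hx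
        exact hdlt j (by rw [List.mem_range] at hj; omega)
      have hdpos : (0 : Int) < d := hposall d (by rw [hD]; exact List.mem_cons_self ..)
      have hAgcd : redgcd (diffs (uniq (i :: is)))
          = ((ds.foldl (fun g x => Nat.gcd g x.natAbs) d.natAbs : Nat) : Int) := by
        have h := foldl_pygcd_eq ds d.natAbs
        rw [Int.natAbs_of_nonneg (le_of_lt hdpos)] at h
        rw [hD]
        exact h
      have hNA : ∀ k : Nat, (k ∣ ds.foldl (fun g x => Nat.gcd g x.natAbs) d.natAbs) ↔
          ∀ x ∈ diffs (uniq (i :: is)), (k : Int) ∣ x := by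
        intro k
        rw [dvd_red_iff, hD]
      -- min = head of the sorted unique list
      have h0lt : 0 < (uniq (i :: is)).length := by omega
      have hu0mem : (uniq (i :: is)).getD 0 0 ∈ uniq (i :: is) := by
        rw [List.getD_eq_getElem _ _ h0lt]
        exact List.getElem_mem _
      have hm0 : bmin i is ≤ (uniq (i :: is)).getD 0 0 := hmle _ ((hmem _).mp hu0mem)
      have h0m : (uniq (i :: is)).getD 0 0 ≤ bmin i is := by
        obtain ⟨j, hj, hje⟩ := List.mem_iff_getElem.mp ((hmem _).mpr hmmem)
        rw [List.getD_eq_getElem _ _ h0lt, ← hje]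
        rcases Nat.eq_zero_or_pos j with rfl | hjpos
        · exact le_refl _
        · exact le_of_lt (List.pairwise_iff_getElem.mp hpw 0 j h0lt hj hjpos)
      have hmu0 : bmin i is = (uniq (i :: is)).getD 0 0 := le_antisymm hm0 h0m
      -- the two gcds divide each other
      have hdvd1 : ds.foldl (fun g x => Nat.gcd g x.natAbs) d.natAbs ∣
          (is.map (fun x => x - bmin i is)).foldl (fun g x => Nat.gcd g x.natAbs)
            (i - bmin i is).natAbs := by
        apply (hNB _).mpr
        intro x hx
        obtain ⟨j, hj, hje⟩ := List.mem_iff_getElem.mp ((hmem x).mpr hx)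
        have hxj : x = (uniq (i :: is)).getD j 0 := by
          rw [List.getD_eq_getElem _ _ hj, hje]
        rw [hxj, hmu0]
        refine telescope _ _ ?_ j hj
        intro j' hj'
        refine (hNA _).mp dvd_rfl _ ?_
        rw [hdiffs]
        exact List.mem_map.mpr ⟨j', List.mem_range.mpr (by omega), rfl⟩
      have hdvd2 : (is.map (fun x => x - bmin i is)).foldl (fun g x => Nat.gcd g x.natAbs)
            (i - bmin i is).natAbs ∣
          ds.foldl (fun g x => Nat.gcd g x.natAbs) d.natAbs := by
        apply (hNA _).mpr
        intro x hx
        rw [hdiffs] at hx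
        obtain ⟨j, hjr, rfl⟩ := List.mem_map.mp hx
        have hj1 : j + 1 < (uniq (i :: is)).length := by
          rw [List.mem_range] at hjr; omega
        have hj0 : j < (uniq (i :: is)).length := by omega
        have hmem1 : (uniq (i :: is)).getD (j+1) 0 ∈ i :: is := by
          apply (hmem _).mp
          rw [List.getD_eq_getElem _ _ hj1]
          exact List.getElem_mem _
        have hmem0 : (uniq (i :: is)).getD j 0 ∈ i :: is := by
          apply (hmem _).mp
          rw [List.getD_eq_getElem _ _ hj0]
          exact List.getElem_mem _
        have ha := (hNB _).mp dvd_rfl _ hmem1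
        have hb := (hNB _).mp dvd_rfl _ hmem0
        have hc := dvd_sub ha hb
        rwa [sub_sub_sub_cancel_right] at hc
      have hNAB := Nat.dvd_antisymm hdvd1 hdvd2
      rw [hA, hB, hAgcd, hred, hNAB]

theorem A_eq_core (lb : List String) :
    detect_base_indent lb = Acore ((lb.filter is_list_item).map count_leading_spaces) := by
  have h : lb.foldl
      (fun acc line => if is_list_item line then acc ++ [count_leading_spaces line] else acc)
      ([] : List Int) = (lb.filter is_list_item).map count_leading_spaces := by
    simpa using PySem.List.foldl_append_if is_list_item count_leading_spaces lb []
  calc detect_base_indent lb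
      = Acore (lb.foldl
          (fun acc line => if is_list_item line then acc ++ [count_leading_spaces line] else acc)
          ([] : List Int)) := rfl
    _ = Acore ((lb.filter is_list_item).map count_leading_spaces) := by rw [h]

theorem B_eq_core (lb : List String) :
    detect_base_indent_alt lb = Bcore ((lb.filter is_list_item).map count_leading_spaces) := rfl

-- ===== VERDICT (by name: the statement is the Claim_ definition above) =====
theorem detect_base_indent_spec : Claim_equal_detect_base_indent := by
  intro lb _
  show detect_base_indent lb = detect_base_indent_alt lb
  rw [A_eq_core, B_eq_core]
  exact core_eq _
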